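-- pv_equiv track=rewrite | github.com/zappbrandigan/ferp-scripts | gftv/pdf_text_diff/script.py | _diff_counts
-- ===== SOURCE A (Python) =====
-- from typing import Callable, Sequence
--
-- def _diff_counts(opcodes: Sequence[tuple[str, int, int, int, int]]) -> dict[str, int]:
--     inserted = 0
--     deleted = 0
--     replaced_a = 0
--     replaced_b = 0
--     change_blocks = 0
--
--     for tag, i1, i2, j1, j2 in opcodes:
--         if tag == "equal":
--             continue
--         change_blocks += 1
--         if tag == "insert":
--             inserted += j2 - j1
--         elif tag == "delete":
--             deleted += i2 - i1
--         elif tag == "replace":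
--             replaced_a += i2 - i1
--             replaced_b += j2 - j1
--
--     return {
--         "change_blocks": change_blocks,
--         "inserted_lines": inserted,
--         "deleted_lines": deleted,
--         "replaced_lines_a": replaced_a,
--         "replaced_lines_b": replaced_b,
--     }
-- ===== SOURCE B (Python) =====
-- def _diff_counts(opcodes):
--     return {
--         "change_blocks": sum(1 for tag, _i1, _i2, _j1, _j2 in opcodes if tag != "equal"),
--         "inserted_lines": sum(j2 - j1 for tag, i1, i2, j1, j2 in opcodes if tag == "insert"),
--         "deleted_lines": sum(i2 - i1 for tag, i1, i2, j1, j2 in opcodes if tag == "delete"),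
--         "replaced_lines_a": sum(i2 - i1 for tag, i1, i2, j1, j2 in opcodes if tag == "replace"),
--         "replaced_lines_b": sum(j2 - j1 for tag, i1, i2, j1, j2 in opcodes if tag == "replace"),
--     }
-- ===== Notes on version B (the rewrite author's own statement) =====
-- stated objective: simpler
-- what changed: Replaced the single accumulator loop with five independent aggregations over the opcode list (one filtered sum/count per output field), assembled directly into the result dict.
import Mathlib
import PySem

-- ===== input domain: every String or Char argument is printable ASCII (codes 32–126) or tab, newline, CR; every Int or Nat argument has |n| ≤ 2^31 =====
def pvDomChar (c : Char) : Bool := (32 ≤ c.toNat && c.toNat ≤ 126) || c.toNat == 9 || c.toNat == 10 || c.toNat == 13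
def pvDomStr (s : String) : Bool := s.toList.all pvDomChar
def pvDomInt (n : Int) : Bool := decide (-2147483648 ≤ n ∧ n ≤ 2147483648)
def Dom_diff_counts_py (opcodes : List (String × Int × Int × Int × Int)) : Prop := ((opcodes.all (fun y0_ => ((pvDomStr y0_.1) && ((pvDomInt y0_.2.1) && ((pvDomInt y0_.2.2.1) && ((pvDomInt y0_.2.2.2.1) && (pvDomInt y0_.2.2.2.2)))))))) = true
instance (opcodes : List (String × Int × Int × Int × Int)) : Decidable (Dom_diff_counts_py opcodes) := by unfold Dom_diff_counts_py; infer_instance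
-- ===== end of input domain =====

-- B replaces A's single accumulator loop with five independent filtered aggregations; objective: simpler.


-- ===== PORT A =====
-- the loop body of A, one step per opcode, over the state (inserted, deleted, replaced_a, replaced_b, change_blocks)
def diffCountsStep (s : Int × Int × Int × Int × Int) (t : String × Int × Int × Int × Int) :
    Int × Int × Int × Int × Int :=
  let (ins, del, ra, rb, cb) := s
  let (tag, i1, i2, j1, j2) := t
  if tag == "equal" then (ins, del, ra, rb, cb)
  else
    let cb := cb + 1
    if tag == "insert" then (ins + (j2 - j1), del, ra, rb, cb)
    else if tag == "delete" then (ins, del + (i2 - i1), ra, rb, cb)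
    else if tag == "replace" then (ins, del, ra + (i2 - i1), rb + (j2 - j1), cb)
    else (ins, del, ra, rb, cb)

def diff_counts_py (opcodes : List (String × Int × Int × Int × Int)) : List (String × Int) :=
  let st := opcodes.foldl diffCountsStep (0, 0, 0, 0, 0)
  [("change_blocks", st.2.2.2.2),
   ("inserted_lines", st.1),
   ("deleted_lines", st.2.1),
   ("replaced_lines_a", st.2.2.1),
   ("replaced_lines_b", st.2.2.2.1)]

-- ===== PORT B =====
-- five independent aggregations, one per output field
def diff_counts_py_alt (opcodes : List (String × Int × Int × Int × Int)) : List (String × Int) :=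
  [("change_blocks", (((opcodes.filter (fun t => t.1 != "equal")).map (fun _ => (1 : Int))).sum)),
   ("inserted_lines", ((opcodes.filter (fun t => t.1 == "insert")).map (fun t => t.2.2.2.2 - t.2.2.2.1)).sum),
   ("deleted_lines", ((opcodes.filter (fun t => t.1 == "delete")).map (fun t => t.2.2.1 - t.2.1)).sum),
   ("replaced_lines_a", ((opcodes.filter (fun t => t.1 == "replace")).map (fun t => t.2.2.1 - t.2.1)).sum),
   ("replaced_lines_b", ((opcodes.filter (fun t => t.1 == "replace")).map (fun t => t.2.2.2.2 - t.2.2.2.1)).sum)]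

-- ===== PRECONDITION & SPEC =====
def Spec_diff_counts_py (opcodes : List (String × Int × Int × Int × Int)) (out : List (String × Int)) : Prop := out = diff_counts_py_alt opcodes
instance (opcodes : List (String × Int × Int × Int × Int)) (out : List (String × Int)) : Decidable (Spec_diff_counts_py opcodes out) := by unfold Spec_diff_counts_py; infer_instance

-- ===== CLAIM (what is proved, stated in full; the proofs are below) =====
def Claim_equal_diff_counts_py : Prop := ∀ (opcodes : List (String × Int × Int × Int × Int)), Dom_diff_counts_py opcodes → Spec_diff_counts_py opcodes (diff_counts_py opcodes)

-- ===== LEMMAS AND PROOFS =====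
-- the five aggregations of B, as functions of the list
def pvCnt (l : List (String × Int × Int × Int × Int)) : Int :=
  ((l.filter (fun t => t.1 != "equal")).map (fun _ => (1 : Int))).sum
def pvIns (l : List (String × Int × Int × Int × Int)) : Int :=
  ((l.filter (fun t => t.1 == "insert")).map (fun t => t.2.2.2.2 - t.2.2.2.1)).sum
def pvDel (l : List (String × Int × Int × Int × Int)) : Int :=
  ((l.filter (fun t => t.1 == "delete")).map (fun t => t.2.2.1 - t.2.1)).sum
def pvRa (l : List (String × Int × Int × Int × Int)) : Int :=
  ((l.filter (fun t => t.1 == "replace")).map (fun t => t.2.2.1 - t.2.1)).sum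
def pvRb (l : List (String × Int × Int × Int × Int)) : Int :=
  ((l.filter (fun t => t.1 == "replace")).map (fun t => t.2.2.2.2 - t.2.2.2.1)).sum

theorem diffCounts_fold_eq (l : List (String × Int × Int × Int × Int)) :
    ∀ (ins del ra rb cb : Int),
      l.foldl diffCountsStep (ins, del, ra, rb, cb) =
        (ins + pvIns l, del + pvDel l, ra + pvRa l, rb + pvRb l, cb + pvCnt l) := by
  induction l with
  | nil => intro ins del ra rb cb; simp [pvIns, pvDel, pvRa, pvRb, pvCnt]
  | cons h t ih =>
    intro ins del ra rb cb
    obtain ⟨tag, i1, i2, j1, j2⟩ := h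
    by_cases he : tag = "equal"
    · simp [diffCountsStep, he, ih, pvIns, pvDel, pvRa, pvRb, pvCnt]
    · by_cases hi : tag = "insert"
      · simp [diffCountsStep, hi, ih, pvIns, pvDel, pvRa, pvRb, pvCnt]
        and_intros <;> ring
      · by_cases hd : tag = "delete"
        · simp [diffCountsStep, hd, ih, pvIns, pvDel, pvRa, pvRb, pvCnt]
          and_intros <;> ring
        · by_cases hr : tag = "replace"
          · simp [diffCountsStep, hr, ih, pvIns, pvDel, pvRa, pvRb, pvCnt]
            and_intros <;> ring
          · simp [diffCountsStep, he, hi, hd, hr, ih, pvIns, pvDel, pvRa, pvRb, pvCnt]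
            ring

-- ===== VERDICT (by name: the statement is the Claim_ definition above) =====
theorem diff_counts_py_spec : Claim_equal_diff_counts_py := by
  intro opcodes _
  unfold Spec_diff_counts_py diff_counts_py diff_counts_py_alt
  simp [diffCounts_fold_eq, pvIns, pvDel, pvRa, pvRb, pvCnt]
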